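-- pv_equiv track=rewrite | github.com/dannys0n/OpenCast | deployment/testing/cs2_gsi_listener_mono_commentator.py | is_spike_event
-- ===== SOURCE A (Python) =====
-- def is_spike_event(events):
--     text = " ".join(events).lower()
--     spike_markers = (
--         "kill",
--         "goes down",
--         "eliminated",
--         "bomb",
--         "score update",
--         "heavy damage",
--         "low:",
--         "round phase changed",
--     )
--     return any(marker in text for marker in spike_markers)
-- ===== SOURCE B (Python) =====
-- _SPIKE_MARKERS = (
--     "kill",
--     "goes down",
--     "eliminated",
--     "bomb",
--     "score update",
--     "heavy damage",
--     "low:",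
--     "round phase changed",
-- )
--
-- def is_spike_event(events):
--     # One left-to-right scan over the joined text: at each position check
--     # whether some marker starts there, instead of eight full substring scans.
--     text = " ".join(events).lower()
--     for i in range(len(text)):
--         for marker in _SPIKE_MARKERS:
--             if text.startswith(marker, i):
--                 return True
--     return False
-- ===== Notes on version B (the rewrite author's own statement) =====
-- stated objective: alternative
-- what changed: Replaced eight independent full substring scans (any(marker in text)) with a single left-to-right pass over the joined lowered text that checks at each position whether any marker starts there, returning early on the first hit.
import Mathlib
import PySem

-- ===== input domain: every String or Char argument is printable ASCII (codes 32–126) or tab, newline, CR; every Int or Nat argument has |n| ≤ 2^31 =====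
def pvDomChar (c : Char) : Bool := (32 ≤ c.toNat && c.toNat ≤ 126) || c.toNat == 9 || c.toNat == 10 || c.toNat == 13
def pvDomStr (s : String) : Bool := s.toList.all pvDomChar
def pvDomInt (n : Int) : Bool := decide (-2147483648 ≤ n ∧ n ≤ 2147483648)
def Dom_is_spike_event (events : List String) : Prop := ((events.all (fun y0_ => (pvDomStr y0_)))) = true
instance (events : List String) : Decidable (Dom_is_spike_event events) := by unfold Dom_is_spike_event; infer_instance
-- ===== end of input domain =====

-- B replaces A's eight independent substring searches by one positional scan of the joined text; objective: alternative (same cost, different traversal).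

-- ===== PORT A =====
-- the tuple of spike markers, in A's order
def spikeMarkers : List String :=
  ["kill", "goes down", "eliminated", "bomb", "score update", "heavy damage",
   "low:", "round phase changed"]

def is_spike_event (events : List String) : Bool :=
  -- text = " ".join(events).lower()
  let text := PySem.Str.lower (PySem.Str.join " " events)
  -- any(marker in text for marker in spike_markers)
  spikeMarkers.any (fun marker => PySem.Str.isIn marker text)

-- ===== PORT B =====
-- markers as char lists (B's tuple _SPIKE_MARKERS)
def spikeMarkersB : List (List Char) :=
  [ "kill".toList, "goes down".toList, "eliminated".toList, "bomb".toList,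
    "score update".toList, "heavy damage".toList, "low:".toList,
    "round phase changed".toList ]

-- the scan over positions i = 0 .. len(text)-1: recursion over the suffix text[i:];
-- text.startswith(marker, i) is marker.isPrefixOf (suffix at i), exact for startswith with offset
def spikeScan (cs : List Char) : Bool :=
  match cs with
  | [] => false
  | _ :: rest => spikeMarkersB.any (fun m => m.isPrefixOf cs) || spikeScan rest

def is_spike_event_alt (events : List String) : Bool :=
  let text := PySem.Str.lower (PySem.Str.join " " events)
  spikeScan text.toList

-- ===== PRECONDITION & SPEC =====
def Spec_is_spike_event (events : List String) (out : Bool) : Prop := out = is_spike_event_alt events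
instance (events : List String) (out : Bool) : Decidable (Spec_is_spike_event events out) := by unfold Spec_is_spike_event; infer_instance

-- ===== CLAIM (what is proved, stated in full; the proofs are below) =====
def Claim_equal_is_spike_event : Prop := ∀ (events : List String), Dom_is_spike_event events → Spec_is_spike_event events (is_spike_event events)

-- ===== LEMMAS AND PROOFS =====

-- the positional scan finds exactly the markers occurring as infixes
theorem spikeScan_eq_any_infix (cs : List Char) :
    spikeScan cs = spikeMarkersB.any (fun m => decide (m <:+: cs)) := by
  induction cs with
  | nil => decide
  | cons c rest ih =>
    rw [spikeScan, ih]
    apply Bool.eq_iff_iff.mpr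
    simp only [Bool.or_eq_true, List.any_eq_true, decide_eq_true_eq,
      List.isPrefixOf_iff_prefix, List.infix_cons_iff]
    constructor
    · rintro (⟨m, hm, h⟩ | ⟨m, hm, h⟩)
      · exact ⟨m, hm, Or.inl h⟩
      · exact ⟨m, hm, Or.inr h⟩
    · rintro ⟨m, hm, h | h⟩
      · exact Or.inl ⟨m, hm, h⟩
      · exact Or.inr ⟨m, hm, h⟩

theorem spikeMarkersB_eq : spikeMarkersB = spikeMarkers.map String.toList := rfl

theorem is_spike_event_spec' (events : List String) :
    is_spike_event events = is_spike_event_alt events := by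
  unfold is_spike_event is_spike_event_alt
  rw [spikeScan_eq_any_infix, spikeMarkersB_eq, List.any_map]
  apply Bool.eq_iff_iff.mpr
  simp only [List.any_eq_true, Function.comp, decide_eq_true_eq, PySem.Str.isIn_iff_infix]

-- ===== VERDICT (by name: the statement is the Claim_ definition above) =====
theorem is_spike_event_spec : Claim_equal_is_spike_event := by
  intro events _
  exact is_spike_event_spec' events
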